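-- pv_equiv track=rewrite | github.com/lydiaastrella/24-Game-Solver-GUI | src/backend1.py | CountPoin
-- ===== SOURCE A (Python) =====
-- def CountPoin (Solusi,Op,Bracket):
-- #I.S. list Solusi terdefinisi (tidak boleh kosong), char Op dan int Bracket terdefinisi
-- #F.S. Output poin tiap operator dan tanda kurung yang digunakan, yaitu
-- # '+'=5, '-'=4, '*'=3, '/'=2, '()'=-1
-- 	Minus = False #True jika Op yang sebelumnya dipakai '+' atau '-'
-- 	i=1
-- 	Poin=0
-- 	while(i<(len(Solusi)-1)):
-- 		if(Solusi[i] == '+'):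
-- 			Poin+=5
-- 			Minus = True
-- 		elif(Solusi[i] == '-'):
-- 			Poin+=4
-- 			Minus = True
-- 		elif(Solusi[i] == '*'):
-- 			if(Minus):
-- 				Poin+=2
-- 			else:
-- 				Poin+=3
-- 			Minus=False
-- 		elif(Solusi[i] == '/'):
-- 			if(Minus):
-- 				Poin+=1
-- 			else:
-- 				Poin+=2
-- 		i+=2
-- 	if(Op == '+'):
-- 		Poin+=5
-- 	elif(Op == '-'):
-- 		Poin+=4
-- 	elif(Op == '*'):
-- 		if(Minus):
-- 			Poin +=2
-- 		else:
-- 			Poin +=3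
-- 	else:
-- 		if(Minus):
-- 			Poin +=1
-- 		else:
-- 			Poin+=2
-- 	if(Bracket==3):
-- 		Poin-=1
-- 	return Poin
-- ===== SOURCE B (Python) =====
-- def split_on_star(ops):
--     # cut the operator word at each '*'
--     segs = [[]]
--     for c in ops:
--         if c == '*':
--             segs.append([])
--         else:
--             segs[-1].append(c)
--     return segs
--
--
-- def CountPoin(Solusi, Op, Bracket):
--     # Base points per operator; a '*' or '/' is worth 1 point less when an
--     # unresolved '+'/'-' precedes it, i.e. when a sign occurs earlier in its
--     # own '*'-delimited segment ('*' closes the pending sign, '/' keeps it).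
--     BASE = {'+': 5, '-': 4, '*': 3, '/': 2}
--     inner = Solusi[1:][:-1]
--     ops = [c for i, c in enumerate(inner) if i % 2 == 0 and c in BASE]
--     ops.append(Op if Op in ('+', '-', '*') else '/')
--     poin = sum(BASE[c] for c in ops) - (Bracket == 3)
--     segs = split_on_star(ops)
--     for i, seg in enumerate(segs):
--         signs = [j for j, c in enumerate(seg) if c in ('+', '-')]
--         if signs:
--             poin -= seg[signs[0]:].count('/')     # discounted divides
--             if i < len(segs) - 1:
--                 poin -= 1                         # the '*' closing this segment
--     return poin
-- ===== Notes on version B (the rewrite author's own statement) =====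
-- stated objective: alternative
-- what changed: Replaces A's stateful scan with a running Minus flag by a stateless table-plus-combinatorial computation: sum base points from a dict, then split the operator word at '*' and subtract one discount per '*' closing a sign-carrying segment and per '/' occurring after the first sign of its segment.
import Mathlib
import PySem

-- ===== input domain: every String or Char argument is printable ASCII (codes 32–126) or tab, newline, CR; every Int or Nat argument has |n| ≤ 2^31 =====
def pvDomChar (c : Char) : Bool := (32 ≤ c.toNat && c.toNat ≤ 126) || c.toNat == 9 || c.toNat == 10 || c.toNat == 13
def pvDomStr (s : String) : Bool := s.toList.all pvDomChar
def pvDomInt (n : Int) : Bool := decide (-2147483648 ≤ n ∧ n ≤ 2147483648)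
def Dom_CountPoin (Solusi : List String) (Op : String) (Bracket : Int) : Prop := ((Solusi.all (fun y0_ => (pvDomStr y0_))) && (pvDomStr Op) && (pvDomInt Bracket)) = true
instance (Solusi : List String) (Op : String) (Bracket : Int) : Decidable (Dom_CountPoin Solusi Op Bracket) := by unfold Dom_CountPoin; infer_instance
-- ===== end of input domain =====

-- B replaces A's stateful Minus-flag scan by a stateless computation: sum base points from a
-- table, then split the operator word at '*' and subtract the per-segment discounts (objective: alternative).


-- ===== PORT A =====
-- A's while-loop: i starts at 1 and only grows, so a Nat index is exact; Python's int guard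
-- 'i < len(Solusi)-1' is equivalent to 'i + 1 < Solusi.length' for i ≥ 1.
def CountPoinLoopA (S : List String) (i : Nat) (Minus : Bool) (Poin : Int) : Bool × Int :=
  if h : i + 1 < S.length then
    let s := S[i]'(by omega)
    if s = "+" then CountPoinLoopA S (i + 2) true (Poin + 5)
    else if s = "-" then CountPoinLoopA S (i + 2) true (Poin + 4)
    else if s = "*" then CountPoinLoopA S (i + 2) false (Poin + (if Minus then 2 else 3))
    else if s = "/" then CountPoinLoopA S (i + 2) Minus (Poin + (if Minus then 1 else 2))
    else CountPoinLoopA S (i + 2) Minus Poin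
  else (Minus, Poin)
termination_by S.length - i

def CountPoin (Solusi : List String) (Op : String) (Bracket : Int) : Int :=
  let r := CountPoinLoopA Solusi 1 false 0
  let Minus := r.1
  let Poin := r.2
  let Poin :=
    if Op = "+" then Poin + 5
    else if Op = "-" then Poin + 4
    else if Op = "*" then (if Minus then Poin + 2 else Poin + 3)
    else (if Minus then Poin + 1 else Poin + 2)
  if Bracket = 3 then Poin - 1 else Poin

-- ===== PORT B =====
-- 'c in BASE' (membership in the dict's keys).
def pvInBase (c : String) : Bool := c == "+" || c == "-" || c == "*" || c == "/"
-- 'BASE[c]': dict lookup, only ever applied to keys of BASE.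
def pvBaseVal (c : String) : Int :=
  if c == "+" then 5 else if c == "-" then 4 else if c == "*" then 3 else 2

-- split_on_star: 'segs[-1].append(c)' replaces the last segment by itself extended with c.
def pvSplitOnStar (ops : List String) : List (List String) :=
  ops.foldl (fun segs c =>
    if c == "*" then segs ++ [[]]
    else segs.dropLast ++ [segs.getLastD [] ++ [c]]) [[]]

def CountPoin_alt (Solusi : List String) (Op : String) (Bracket : Int) : Int :=
  let inner := PySem.List.slice (PySem.List.slice Solusi (some 1) none) none (some (-1))
  let ops := (((PySem.List.enumerate inner 0).filter
        (fun p => (PySem.Int.mod p.1 2 == 0) && pvInBase p.2)).map (·.2))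
      ++ [if Op == "+" || Op == "-" || Op == "*" then Op else "/"]
  let poin := (ops.map pvBaseVal).sum - (if Bracket == 3 then 1 else 0)
  let segs := pvSplitOnStar ops
  (PySem.List.enumerate segs 0).foldl (fun poin p =>
      let signs := ((PySem.List.enumerate p.2 0).filter
          (fun q => q.2 == "+" || q.2 == "-")).map (·.1)
      match signs with
      | [] => poin
      | j :: _ =>
          let poin := poin - (PySem.List.count (PySem.List.slice p.2 (some j) none) "/" : Int)
          if p.1 < (segs.length : Int) - 1 then poin - 1 else poin) poin

-- ===== PRECONDITION & SPEC =====
def Spec_CountPoin (Solusi : List String) (Op : String) (Bracket : Int) (out : Int) : Prop := out = CountPoin_alt Solusi Op Bracket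
instance (Solusi : List String) (Op : String) (Bracket : Int) (out : Int) : Decidable (Spec_CountPoin Solusi Op Bracket out) := by unfold Spec_CountPoin; infer_instance

-- ===== CLAIM (what is proved, stated in full; the proofs are below) =====
def Claim_equal_CountPoin : Prop := ∀ (Solusi : List String) (Op : String) (Bracket : Int), Dom_CountPoin Solusi Op Bracket → Spec_CountPoin Solusi Op Bracket (CountPoin Solusi Op Bracket)

-- ===== LEMMAS AND PROOFS =====

-- a sign character
def pvSignP (c : String) : Bool := c == "+" || c == "-"

-- A's per-operator scoring step: (points, new Minus flag)
def pvStepA (c : String) (M : Bool) : Int × Bool :=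
  if c = "+" then (5, true)
  else if c = "-" then (4, true)
  else if c = "*" then ((if M then 2 else 3), false)
  else if c = "/" then ((if M then 1 else 2), M)
  else (0, M)

-- A's whole scan as a recursion over the operator list: (points, final flag)
def pvRunA : List String → Bool → Int × Bool
  | [], M => (0, M)
  | c :: t, M =>
      let s := pvStepA c M
      let r := pvRunA t s.2
      (s.1 + r.1, r.2)

-- the operators A's loop visits: elements at odd index i with i + 1 < length
def pvAOps : List String → List String
  | _ :: b :: c :: t => b :: pvAOps (c :: t)
  | _ => []

-- every second element of l, starting with the first iff the flag is true
def pvEV : List String → Bool → List String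
  | [], _ => []
  | a :: t, b => if b then a :: pvEV t false else pvEV t true

-- B's split_on_star, structurally: (first segment, remaining segments)
def pvSplitS : List String → List String × List (List String)
  | [] => ([], [])
  | c :: t =>
      let p := pvSplitS t
      if c = "*" then ([], p.1 :: p.2) else (c :: p.1, p.2)

-- discount contributed by the '/'s of one segment, given the entry flag
def pvFseg (s : List String) (M : Bool) : Int :=
  if M then (PySem.List.count s "/" : Int)
  else match s.findIdx? pvSignP with
       | none => 0
       | some j => (PySem.List.count (s.drop j) "/" : Int)

-- total discount of a list of segments, each entered with flag false
def pvGRest : List (List String) → Int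
  | [] => 0
  | s :: r =>
      pvFseg s false + (if r.isEmpty then 0 else if (s.findIdx? pvSignP).isSome then 1 else 0)
        + pvGRest r

-- total discount of split segments (head entered with flag M)
def pvGTop (p : List String × List (List String)) (M : Bool) : Int :=
  pvFseg p.1 M
    + (if p.2.isEmpty then 0 else if M || (p.1.findIdx? pvSignP).isSome then 1 else 0)
    + pvGRest p.2

-- the discount A's flag logic implies, as a stateful recursion (proof device)
def pvDD : List String → Bool → Int
  | [], _ => 0
  | c :: t, M =>
      if c = "+" ∨ c = "-" then pvDD t true
      else if c = "*" then (if M then 1 else 0) + pvDD t false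
      else if c = "/" then (if M then 1 else 0) + pvDD t M
      else pvDD t M

lemma pvAOps_short (l : List String) (h : l.length ≤ 2) : pvAOps l = [] := by
  match l with
  | [] => rfl
  | [a] => rfl
  | [a, b] => rfl
  | a :: b :: c :: t => simp at h

-- A's indexed loop computes pvRunA on the operators of the suffix
lemma pvKey :
    ∀ (n : Nat) (S : List String) (i : Nat) (M : Bool) (P : Int),
      S.length ≤ n + i → 1 ≤ i →
      CountPoinLoopA S i M P
        = ((pvRunA (pvAOps (S.drop (i - 1))) M).2, P + (pvRunA (pvAOps (S.drop (i - 1))) M).1) := by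
  intro n
  induction n with
  | zero =>
      intro S i M P hlen hi
      rw [CountPoinLoopA]
      have h2 : ¬ (i + 1 < S.length) := by omega
      rw [dif_neg h2, pvAOps_short _ (by rw [List.length_drop]; omega)]
      simp [pvRunA]
  | succ m ih =>
      intro S i M P hlen hi
      by_cases h : i + 1 < S.length
      · have hi1 : i - 1 < S.length := by omega
        have hi0 : i < S.length := by omega
        have e1 : S.drop (i - 1) = S[i - 1] :: S[i] :: S[i + 1] :: S.drop (i + 2) := by
          have e : i - 1 + 1 = i := by omega
          rw [List.drop_eq_getElem_cons hi1, e, List.drop_eq_getElem_cons hi0,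
              List.drop_eq_getElem_cons h]
        have e2 : S.drop (i + 2 - 1) = S[i + 1] :: S.drop (i + 2) := by
          have e : i + 2 - 1 = i + 1 := by omega
          rw [e, List.drop_eq_getElem_cons h]
        have hrec : ∀ (M' : Bool) (P' : Int),
            CountPoinLoopA S (i + 2) M' P'
              = ((pvRunA (pvAOps (S[i + 1] :: S.drop (i + 2))) M').2,
                 P' + (pvRunA (pvAOps (S[i + 1] :: S.drop (i + 2))) M').1) := by
          intro M' P'
          rw [ih S (i + 2) M' P' (by omega) (by omega), e2]
        rw [e1, CountPoinLoopA]
        rw [dif_pos h]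
        show (if S[i] = "+" then CountPoinLoopA S (i + 2) true (P + 5)
              else if S[i] = "-" then CountPoinLoopA S (i + 2) true (P + 4)
              else if S[i] = "*" then CountPoinLoopA S (i + 2) false (P + (if M then 2 else 3))
              else if S[i] = "/" then CountPoinLoopA S (i + 2) M (P + (if M then 1 else 2))
              else CountPoinLoopA S (i + 2) M P) = _
        show _ = ((pvRunA (S[i] :: pvAOps (S[i+1] :: S.drop (i+2))) M).2,
                  P + (pvRunA (S[i] :: pvAOps (S[i+1] :: S.drop (i+2))) M).1)
        simp only [pvRunA, pvStepA]
        split_ifs <;> simp [hrec] <;> ring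
      · rw [CountPoinLoopA, dif_neg h, pvAOps_short _ (by rw [List.length_drop]; omega)]
        simp [pvRunA]

lemma pvRunA_append (l : List String) (c : String) (M : Bool) :
    pvRunA (l ++ [c]) M
      = ((pvRunA l M).1 + (pvStepA c (pvRunA l M).2).1, (pvStepA c (pvRunA l M).2).2) := by
  induction l generalizing M with
  | nil => simp [pvRunA]
  | cons a t ih => simp [pvRunA, ih]; ring

lemma pvStepA_other (c : String) (M : Bool) (h : pvInBase c = false) : pvStepA c M = (0, M) := by
  simp [pvInBase] at h
  obtain ⟨⟨⟨h1, h2⟩, h3⟩, h4⟩ := h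
  simp [pvStepA, h1, h2, h3, h4]

lemma pvRunA_filter (l : List String) (M : Bool) :
    pvRunA (l.filter pvInBase) M = pvRunA l M := by
  induction l generalizing M with
  | nil => rfl
  | cons a t ih =>
      by_cases h : pvInBase a = true
      · simp [List.filter_cons, h, pvRunA, ih]
      · simp only [List.filter_cons, h, if_neg]
        simp only [Bool.not_eq_true] at h
        simp [pvRunA, pvStepA_other a M h, ih]

lemma pvRunA_bsum (l : List String) (M : Bool) (h : ∀ c ∈ l, pvInBase c = true) :
    (pvRunA l M).1 = (l.map pvBaseVal).sum - pvDD l M := by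
  induction l generalizing M with
  | nil => simp [pvRunA, pvDD]
  | cons a t ih =>
      have ha := h a (by simp)
      have ht : ∀ c ∈ t, pvInBase c = true := fun c hc => h c (by simp [hc])
      simp only [pvInBase, Bool.or_eq_true, beq_iff_eq] at ha
      rcases ha with ((ha | ha) | ha) | ha <;>
        subst ha <;>
        simp [pvRunA, pvStepA, pvDD, pvBaseVal, ih _ ht] <;>
        (try split_ifs) <;> ring

lemma pvGRest_cons (s : List String) (r : List (List String)) :
    pvGRest (s :: r) = pvGTop (s, r) false := by
  simp [pvGRest, pvGTop]

lemma pvGTop_splitS (l : List String) (M : Bool) :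
    pvGTop (pvSplitS l) M = pvDD l M := by
  induction l generalizing M with
  | nil =>
      simp [pvSplitS, pvGTop, pvFseg, pvGRest, pvDD, PySem.List.count_eq]
  | cons c t ih =>
      rcases hp : pvSplitS t with ⟨s0, r⟩
      have ihM : ∀ M, pvGTop (s0, r) M = pvDD t M := by intro M'; rw [← hp]; exact ih M'
      by_cases hstar : c = "*"
      · subst hstar
        rw [show pvSplitS ("*" :: t) = ([], s0 :: r) from by simp [pvSplitS, hp]]
        have hg : pvGRest (s0 :: r) = pvDD t false := by rw [pvGRest_cons]; exact ihM false
        have hDD : pvDD ("*" :: t) M = (if M then 1 else 0) + pvDD t false := by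
          simp [pvDD]
        rw [hDD]
        simp [pvGTop, pvFseg, hg, PySem.List.count_eq]
      · have hsplit : pvSplitS (c :: t) = (c :: s0, r) := by simp [pvSplitS, hp, hstar]
        rw [hsplit]
        by_cases hsign : pvSignP c = true
        · -- c is '+' or '-': entry flag of the tail becomes true
          have hne : ¬ c = "/" := by
            simp [pvSignP] at hsign; rcases hsign with h | h <;> simp [h]
          have hDD : pvDD (c :: t) M = pvDD t true := by
            simp [pvSignP] at hsign
            rcases hsign with h | h <;> simp [pvDD, h]
          rw [hDD, ← ihM true]
          simp only [pvGTop, pvFseg]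
          have hfind : (c :: s0).findIdx? pvSignP = some 0 := by
            simp [List.findIdx?_cons, hsign]
          by_cases hM : M <;>
            simp [hM, hfind, hsign, List.drop_zero, pvFseg, PySem.List.count_eq,
              List.count_cons, hne]
        · -- c is '/' or a non-operator: flag unchanged; '/' adds its own discount if M
          have hfind : (c :: s0).findIdx? pvSignP = (s0.findIdx? pvSignP).map (· + 1) := by
            simp only [Bool.not_eq_true] at hsign
            simp [List.findIdx?_cons, hsign]
          have hfseg : ∀ M', pvFseg (c :: s0) M'
              = (if M' ∧ c = "/" then 1 else 0) + pvFseg s0 M' := by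
            intro M'
            by_cases hM : M'
            · by_cases hc : c = "/" <;>
                simp [pvFseg, hM, PySem.List.count_eq, List.count_cons, hc] <;> ring
            · simp only [pvFseg, hM, if_false, hfind]
              cases hj : s0.findIdx? pvSignP with
              | none => simp
              | some j => simp [List.drop_succ_cons, hM]
          have hDD : pvDD (c :: t) M
              = (if M ∧ c = "/" then 1 else 0) + pvDD t M := by
            have h1 : ¬ (c = "+" ∨ c = "-") := by
              simp [pvSignP] at hsign; tauto
            by_cases hc : c = "/" <;> simp [pvDD, h1, hc, hstar]
          rw [hDD, ← ihM M]
          simp only [pvGTop, hfseg, hfind]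
          have hiso : ((s0.findIdx? pvSignP).map (· + 1)).isSome = (s0.findIdx? pvSignP).isSome := by
            cases s0.findIdx? pvSignP <;> rfl
          rw [hiso]
          ring

-- port's foldl-built split equals the structural one
lemma pvSplit_foldl (ops : List String) :
    ∀ (pre : List (List String)) (cur : List String),
      ops.foldl (fun segs c =>
          if c == "*" then segs ++ [[]]
          else segs.dropLast ++ [segs.getLastD [] ++ [c]]) (pre ++ [cur])
        = pre ++ (cur ++ (pvSplitS ops).1) :: (pvSplitS ops).2 := by
  induction ops with
  | nil => intro pre cur; simp [pvSplitS]
  | cons c t ih =>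
      intro pre cur
      by_cases hc : c = "*"
      · subst hc
        simp only [List.foldl_cons, beq_self_eq_true, if_pos]
        rw [ih (pre ++ [cur]) []]
        rcases hp : pvSplitS t with ⟨s0, r⟩
        simp [pvSplitS, hp]
      · have hcb : (c == "*") = false := by simpa using hc
        rw [List.foldl_cons]
        simp only [hcb, Bool.false_eq_true, if_false, List.dropLast_concat, List.getLastD_concat]
        rw [ih pre (cur ++ [c])]
        rcases hp : pvSplitS t with ⟨s0, r⟩
        simp [pvSplitS, hp, hc]

lemma pvSplitOnStar_eq (ops : List String) :
    pvSplitOnStar ops = ((pvSplitS ops).1 :: (pvSplitS ops).2) := by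
  have := pvSplit_foldl ops [] []
  simpa [pvSplitOnStar] using this

-- the filtered-enumerate sign-index list: empty iff no sign, else headed by the first sign index
lemma pvSigns_none (l : List String) (s : Int) (h : l.findIdx? pvSignP = none) :
    ((PySem.List.enumerate l s).filter (fun q => q.2 == "+" || q.2 == "-")).map (·.1) = [] := by
  induction l generalizing s with
  | nil => simp [PySem.List.enumerate_nil]
  | cons a t ih =>
      have ha : pvSignP a = false := by
        by_contra hc
        have hc' : pvSignP a = true := by simpa using hc
        rw [List.findIdx?_cons, hc'] at h
        simp at h
      have h' : t.findIdx? pvSignP = none := by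
        rw [List.findIdx?_cons, ha] at h
        simpa using h
      rw [PySem.List.enumerate_cons]
      have hfa : (fun q : Int × String => q.2 == "+" || q.2 == "-") (s, a) = false := by
        simpa [pvSignP] using ha
      simp only [List.filter_cons, hfa, Bool.false_eq_true, if_false]
      exact ih (s + 1) h'

lemma pvSigns_some (l : List String) (s : Int) (j : Nat) (h : l.findIdx? pvSignP = some j) :
    ∃ rest, ((PySem.List.enumerate l s).filter (fun q => q.2 == "+" || q.2 == "-")).map (·.1)
      = (s + (j : Int)) :: rest := by
  induction l generalizing s j with
  | nil => simp at h
  | cons a t ih =>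
      rw [List.findIdx?_cons] at h
      by_cases ha : pvSignP a = true
      · rw [if_pos ha] at h
        obtain rfl : j = 0 := by simpa using h.symm
        rw [PySem.List.enumerate_cons]
        have hfa : (fun q : Int × String => q.2 == "+" || q.2 == "-") (s, a) = true := by
          simpa [pvSignP] using ha
        simp only [List.filter_cons, hfa, if_true, List.map_cons, Nat.cast_zero, add_zero]
        exact ⟨((PySem.List.enumerate t (s + 1)).filter
            (fun q => q.2 == "+" || q.2 == "-")).map (·.1), by simp⟩
      · rw [if_neg ha] at h
        cases hx : t.findIdx? pvSignP with
        | none => simp [hx] at h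
        | some j' =>
            obtain rfl : j = j' + 1 := by simp [hx] at h; omega
            obtain ⟨rest, hrest⟩ := ih (s + 1) j' hx
            rw [PySem.List.enumerate_cons]
            simp only [Bool.not_eq_true] at ha
            have hfa : (fun q : Int × String => q.2 == "+" || q.2 == "-") (s, a) = false := by
              simpa [pvSignP] using ha
            simp only [List.filter_cons, hfa, Bool.false_eq_true, if_false]
            refine ⟨rest, ?_⟩
            rw [hrest]
            congr 1
            push_cast
            ring


-- the port's discount loop computes pvGRest
lemma pvFoldB (N : Int) :
    ∀ (segs : List (List String)) (s : Int) (acc : Int),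
      0 ≤ s → s + segs.length = N →
      (PySem.List.enumerate segs s).foldl (fun poin p =>
          let signs := ((PySem.List.enumerate p.2 0).filter
              (fun q => q.2 == "+" || q.2 == "-")).map (·.1)
          match signs with
          | [] => poin
          | j :: _ =>
              let poin := poin - (PySem.List.count (PySem.List.slice p.2 (some j) none) "/" : Int)
              if p.1 < N - 1 then poin - 1 else poin) acc
        = acc - pvGRest segs := by
  intro segs
  induction segs with
  | nil => intro s acc _ _; simp [PySem.List.enumerate_nil, pvGRest]
  | cons s0 r ih =>
      intro s acc hs hN
      rw [PySem.List.enumerate_cons, List.foldl_cons]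
      have hr : (s + 1) + (r.length : Int) = N := by
        rw [List.length_cons] at hN; push_cast at hN ⊢; omega
      cases hj : s0.findIdx? pvSignP with
      | none =>
          rw [ih (s + 1) _ (by omega) hr]
          have hsigns := pvSigns_none s0 0 hj
          simp only [hsigns]
          have h0 : pvFseg s0 false = 0 := by simp [pvFseg, hj]
          simp [pvGRest, h0, hj]
      | some j =>
          obtain ⟨rest, hrest⟩ := pvSigns_some s0 0 j hj
          simp only [hrest, zero_add]
          have hcount : (PySem.List.count (PySem.List.slice s0 (some (j : Int)) none) "/" : Int)
              = pvFseg s0 false := by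
            rw [PySem.List.slice_from_natCast]
            simp [pvFseg, hj]
          rw [ih (s + 1) _ (by omega) hr]
          by_cases hre : r = []
          · subst hre
            have hr0 : s + 1 = N := by simpa using hr
            have hnotlt : ¬ (s < N - 1) := by omega
            rw [if_neg hnotlt]
            simp [pvGRest, pvFseg, hj, PySem.List.count_eq, PySem.List.slice_from_natCast]
          · have hne : r.isEmpty = false := by
              cases r with
              | nil => exact absurd rfl hre
              | cons _ _ => rfl
            have h1 : (1 : Int) ≤ r.length := by
              have h0 : 0 < r.length := List.length_pos_iff.mpr hre
              exact_mod_cast h0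
            have hlt : s < N - 1 := by omega
            rw [if_pos hlt]
            simp [pvGRest, pvFseg, hj, hne, PySem.List.count_eq, PySem.List.slice_from_natCast]
            ring

-- even/odd selection: the port's parity comprehension equals pvEV
lemma pvModFlip (s : Int) : (PySem.Int.mod (s + 1) 2 == 0) = !(PySem.Int.mod s 2 == 0) := by
  rw [PySem.Int.mod_eq_emod_of_pos (by norm_num : (0:Int) < 2),
      PySem.Int.mod_eq_emod_of_pos (by norm_num : (0:Int) < 2)]
  by_cases h : s % 2 = 0
  · have h2 : (s + 1) % 2 = 1 := by omega
    simp [h, h2]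
  · have h2 : (s + 1) % 2 = 0 := by omega
    have h3 : s % 2 = 1 := by omega
    simp [h2, h3]

lemma pvLev (l : List String) :
    ∀ (s : Int),
      ((PySem.List.enumerate l s).filter
          (fun p => (PySem.Int.mod p.1 2 == 0) && pvInBase p.2)).map (·.2)
        = (pvEV l (PySem.Int.mod s 2 == 0)).filter pvInBase := by
  induction l with
  | nil => intro s; simp [PySem.List.enumerate_nil, pvEV]
  | cons a t ih =>
      intro s
      rw [PySem.List.enumerate_cons]
      have hflip := pvModFlip s
      by_cases h : (PySem.Int.mod s 2 == 0) = true
      · have h' : (PySem.Int.mod (s + 1) 2 == 0) = false := by rw [hflip, h]; rfl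
        by_cases hb : pvInBase a = true
        · simp only [List.filter_cons, h, hb, Bool.and_self, if_pos, List.map_cons]
          rw [ih (s + 1), h']
          simp [pvEV, h, List.filter_cons, hb]
        · simp only [Bool.not_eq_true] at hb
          simp only [List.filter_cons, h, hb, Bool.and_false, if_neg, Bool.false_eq_true,
            not_false_iff]
          rw [ih (s + 1), h']
          simp [pvEV, h, List.filter_cons, hb]
      · have h0 : (PySem.Int.mod s 2 == 0) = false := by simpa using h
        have h' : (PySem.Int.mod (s + 1) 2 == 0) = true := by rw [hflip, h0]; rfl
        simp only [List.filter_cons, h0, Bool.false_and, if_neg, Bool.false_eq_true, not_false_iff]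
        rw [ih (s + 1), h']
        simp [pvEV, h0]

-- the odd-index operators of S are the even-index elements of S[1:][:-1]
lemma pvEV_odds (S : List String) : pvEV S.tail.dropLast true = pvAOps S := by
  match S with
  | [] => rfl
  | [a] => rfl
  | [a, b] => rfl
  | a :: b :: c :: t =>
      have htail : (a :: b :: c :: t).tail.dropLast = b :: (c :: t).dropLast := rfl
      rw [htail]
      have hrec := pvEV_odds (c :: t)
      have hinner : pvEV ((c :: t).dropLast) false = pvEV (c :: t).tail.dropLast true := by
        cases t with
        | nil => rfl
        | cons d t' => rfl
      show pvEV (b :: (c :: t).dropLast) true = b :: pvAOps (c :: t)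
      rw [show pvEV (b :: (c :: t).dropLast) true = b :: pvEV ((c :: t).dropLast) false from rfl]
      rw [hinner, hrec]
termination_by S.length

-- A's final Op/Bracket block as one pvStepA application of the normalised operator
lemma pvFinA (Op : String) (Bracket : Int) (M : Bool) (P : Int) :
    (if Bracket = 3 then
        (if Op = "+" then P + 5
         else if Op = "-" then P + 4
         else if Op = "*" then (if M then P + 2 else P + 3)
         else (if M then P + 1 else P + 2)) - 1
      else
        (if Op = "+" then P + 5
         else if Op = "-" then P + 4
         else if Op = "*" then (if M then P + 2 else P + 3)
         else (if M then P + 1 else P + 2)))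
      = P + (pvStepA (if Op == "+" || Op == "-" || Op == "*" then Op else "/") M).1
          - (if Bracket == 3 then 1 else 0) := by
  by_cases h3 : Bracket = 3 <;> by_cases h1 : Op = "+" <;> by_cases h2 : Op = "-" <;>
    by_cases h4 : Op = "*" <;>
    simp_all [pvStepA] <;> (try split_ifs) <;> ring

-- ===== VERDICT (by name: the statement is the Claim_ definition above) =====
theorem CountPoin_spec : Claim_equal_CountPoin := by
  intro S Op Br _
  unfold Spec_CountPoin CountPoin CountPoin_alt
  simp only []
  -- name the normalised final operator and B's operator list
  set norm := (if Op == "+" || Op == "-" || Op == "*" then Op else "/") with hnorm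
  have hnormBase : pvInBase norm = true := by
    rw [hnorm]
    by_cases h1 : Op = "+" <;> by_cases h2 : Op = "-" <;> by_cases h4 : Op = "*" <;>
      simp [pvInBase, h1, h2, h4]
  -- B's inner slice is S[1:][:-1] = tail ∘ dropLast
  have hinner : PySem.List.slice (PySem.List.slice S (some 1) none) none (some (-1))
      = S.tail.dropLast := by
    rw [PySem.List.slice_from_one, PySem.List.slice_to_neg_one]
  -- B's comprehension list
  have hops0 : (((PySem.List.enumerate (S.tail.dropLast) 0).filter
        (fun p => (PySem.Int.mod p.1 2 == 0) && pvInBase p.2)).map (·.2))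
      = (pvAOps S).filter pvInBase := by
    rw [pvLev, show (PySem.Int.mod 0 2 == 0) = true by decide, pvEV_odds]
  set opsB := (pvAOps S).filter pvInBase ++ [norm] with hopsB
  have hAllBase : ∀ c ∈ opsB, pvInBase c = true := by
    intro c hc
    rw [hopsB] at hc
    rcases List.mem_append.mp hc with h | h
    · exact List.of_mem_filter h
    · simp at h; subst h; exact hnormBase
  -- evaluate A
  have hloop := pvKey S.length S 1 false 0 (by omega) (by omega)
  simp only [Nat.sub_self, List.drop_zero] at hloop
  rw [hloop]
  rw [pvFinA Op Br]
  -- A = (pvRunA opsB false).1 - bracket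
  have hA : (0 + (pvRunA (pvAOps S) false).1)
        + (pvStepA norm (pvRunA (pvAOps S) false).2).1
      = (pvRunA opsB false).1 := by
    rw [hopsB, pvRunA_append, ← pvRunA_filter (pvAOps S) false]
    ring
  rw [hA, pvRunA_bsum opsB false hAllBase]
  -- evaluate B
  rw [hinner, hops0, ← hopsB]
  rw [pvSplitOnStar_eq opsB]
  rw [pvFoldB ((((pvSplitS opsB).1 :: (pvSplitS opsB).2).length : Int))
        ((pvSplitS opsB).1 :: (pvSplitS opsB).2) 0 _ (by omega) (by push_cast; ring)]
  rw [pvGRest_cons, pvGTop_splitS]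
  ring
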